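-- pv_equiv track=rewrite | github.com/Peter-Park95/coding_test | kakao_blind_2023/이모티콘.py | solution
-- ===== SOURCE A (Python) =====
-- from itertools import product
--
-- def discount_calculator(price, discount):
--     return price * (100 - discount) // 100
--
-- def solution(users, emoticons):
--     result = [0,0]
--     discount_rates = [10,20,30,40]
--     for discounts in product(discount_rates, repeat=len(emoticons)):
--         plus_user = 0
--         total_price = 0
--         for user_discount, user_limit in users:
--             total = 0
--             for price, dc in zip(emoticons, discounts):
--                 if dc >= user_discount:
--                     total += discount_calculator(price, dc)
--             if total >= user_limit:
--                 plus_user += 1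
--             else:
--                 total_price += total
--         if result[0] < plus_user or (result[0] == plus_user and result[1] < total_price):
--             result = [plus_user, total_price]
--     return result
-- ===== SOURCE B (Python) =====
-- def discount_calculator(price, discount):
--     return price * (100 - discount) // 100
--
-- def solution(users, emoticons):
--     rates = [10, 20, 30, 40]
--     best = [0, 0]
--     n = len(emoticons)
--
--     def dfs(idx, subtotals):
--         nonlocal best
--         if idx == n:
--             plus_user = 0
--             total_price = 0
--             for (user_discount, user_limit), sub in zip(users, subtotals):
--                 if sub >= user_limit:
--                     plus_user += 1
--                 else:
--                     total_price += sub
--             if best[0] < plus_user or (best[0] == plus_user and best[1] < total_price):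
--                 best = [plus_user, total_price]
--             return
--         price = emoticons[idx]
--         for dc in rates:
--             dfs(idx + 1,
--                 [s + (discount_calculator(price, dc) if dc >= ud else 0)
--                  for (ud, _), s in zip(users, subtotals)])
--
--     dfs(0, [0] * len(users))
--     return best
-- ===== Notes on version B (the rewrite author's own statement) =====
-- stated objective: alternative
-- what changed: Replaces the itertools.product loop that recomputes every user's total from scratch for each discount tuple with a recursive DFS over the emoticon index that threads an incrementally updated per-user subtotal array and evaluates the best result at the leaves.
import Mathlib
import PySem

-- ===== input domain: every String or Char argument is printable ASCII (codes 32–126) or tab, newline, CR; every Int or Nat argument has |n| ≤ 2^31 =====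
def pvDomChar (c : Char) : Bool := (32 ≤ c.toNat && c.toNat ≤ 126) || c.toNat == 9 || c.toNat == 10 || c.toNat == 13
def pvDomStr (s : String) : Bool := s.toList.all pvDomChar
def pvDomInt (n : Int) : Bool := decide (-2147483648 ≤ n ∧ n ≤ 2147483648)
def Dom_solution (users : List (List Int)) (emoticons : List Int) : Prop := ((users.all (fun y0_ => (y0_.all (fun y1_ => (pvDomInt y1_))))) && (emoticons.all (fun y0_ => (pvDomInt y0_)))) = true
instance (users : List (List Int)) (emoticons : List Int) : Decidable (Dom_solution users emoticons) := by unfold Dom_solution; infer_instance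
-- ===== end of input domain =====

-- B replaces A's itertools.product enumeration (which recomputes each user's total from
-- scratch per tuple) by a DFS over the emoticon index threading per-user running subtotals;
-- same results, a different decomposition.

-- ===== PORT A =====
def discountCalculator (price discount : Int) : Int :=
  PySem.Int.floordiv (price * (100 - discount)) 100

-- itertools.product(discount_rates, repeat=n), in product's order (leftmost varies slowest)
def prodTuples (rates : List Int) : Nat → List (List Int)
  | 0 => [[]]
  | n + 1 => rates.flatMap (fun d => (prodTuples rates n).map (fun t => d :: t))

def solution (users : List (List Int)) (emoticons : List Int) : List Int :=
  let discountRates : List Int := [10, 20, 30, 40]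
  let result :=
    (prodTuples discountRates emoticons.length).foldl (fun result discounts =>
      let pt := users.foldl (fun (acc : Int × Int) user =>
        match user with
        | uDiscount :: uLimit :: _ =>
          let total := (emoticons.zip discounts).foldl
            (fun total pd =>
              if pd.2 ≥ uDiscount then total + discountCalculator pd.1 pd.2 else total) 0
          if total ≥ uLimit then (acc.1 + 1, acc.2) else (acc.1, acc.2 + total)
        | _ => acc) ((0 : Int), (0 : Int))
      if result.1 < pt.1 ∨ (result.1 = pt.1 ∧ result.2 < pt.2) then pt else result)
      ((0 : Int), (0 : Int))
  [result.1, result.2]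

-- ===== PORT B =====
def discountCalculatorB (price discount : Int) : Int :=
  PySem.Int.floordiv (price * (100 - discount)) 100

-- DFS over the remaining emoticons, threading per-user subtotals and the best (pair) so far
def dfsB (users : List (List Int)) (rates : List Int) :
    List Int → List Int → Int × Int → Int × Int
  | [], subtotals, best =>
    let pt := (users.zip subtotals).foldl (fun (acc : Int × Int) us =>
      match us.1 with
      | [] => acc
      | _ :: rest =>
        match rest with
        | [] => acc
        | uLimit :: _ =>
          if us.2 ≥ uLimit then (acc.1 + 1, acc.2) else (acc.1, acc.2 + us.2)) ((0 : Int), (0 : Int))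
    if best.1 < pt.1 ∨ (best.1 = pt.1 ∧ best.2 < pt.2) then pt else best
  | price :: rest, subtotals, best =>
    rates.foldl (fun b dc =>
      dfsB users rates rest
        ((users.zip subtotals).map (fun us =>
          match us.1 with
          | [] => us.2
          | ud :: _ => us.2 + (if dc ≥ ud then discountCalculatorB price dc else 0))) b) best

def solution_alt (users : List (List Int)) (emoticons : List Int) : List Int :=
  let r := dfsB users [10, 20, 30, 40] emoticons (users.map (fun _ => (0 : Int))) (0, 0)
  [r.1, r.2]

-- ===== PRECONDITION & SPEC =====
-- Pre_ excludes user rows that are not exactly [discount, limit]: Python A's tuple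
-- unpacking raises ValueError there (B raises too).
def Pre_solution (users : List (List Int)) (emoticons : List Int) : Prop :=
  ∀ u ∈ users, u.length = 2
instance (users : List (List Int)) (emoticons : List Int) : Decidable (Pre_solution users emoticons) := by unfold Pre_solution; infer_instance

def pvWitness_solution : List (List Int) × List Int := ([[40, 100], [25, 10000]], [7000, 9000])

def Spec_solution (users : List (List Int)) (emoticons : List Int) (out : List Int) : Prop := out = solution_alt users emoticons
instance (users : List (List Int)) (emoticons : List Int) (out : List Int) : Decidable (Spec_solution users emoticons out) := by unfold Spec_solution; infer_instance

-- ===== CLAIM (what is proved, stated in full; the proofs are below) =====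
def Claim_equal_solution : Prop := ∀ (users : List (List Int)) (emoticons : List Int), Dom_solution users emoticons → Pre_solution users emoticons → Spec_solution users emoticons (solution users emoticons)

-- ===== LEMMAS AND PROOFS =====

-- contribution of one emoticon at discount dc to the total of a user with threshold ud
def contribF (price dc ud : Int) : Int :=
  if dc ≥ ud then discountCalculator price dc else 0

-- A-side per-user total over a (price, discount) zip, as a map-sum
def psum (es ds : List Int) (ud : Int) : Int :=
  ((es.zip ds).map (fun pd => contribF pd.1 pd.2 ud)).sum

-- finalize users against subtotals, each user's total being subtotal + ps ud
def finPS (users : List (List Int)) (subt : List Int) (ps : Int → Int)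
    (acc : Int × Int) : Int × Int :=
  (users.zip subt).foldl (fun (acc : Int × Int) us =>
    match us.1 with
    | ud :: uLimit :: _ =>
      if us.2 + ps ud ≥ uLimit then (acc.1 + 1, acc.2) else (acc.1, acc.2 + (us.2 + ps ud))
    | _ => acc) acc

theorem foldl_flatMap {α β γ : Type} (l : List α) (g : α → List β)
    (f : γ → β → γ) (b : γ) :
    List.foldl f b (l.flatMap g) = l.foldl (fun b a => (g a).foldl f b) b := by
  induction l generalizing b with
  | nil => rfl
  | cons x xs ih => simp [List.flatMap_cons, List.foldl_append, ih]

theorem foldl_shift (ud : Int) (l : List (Int × Int)) (s : Int) :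
    l.foldl (fun total pd =>
      if pd.2 ≥ ud then total + discountCalculator pd.1 pd.2 else total) s
      = s + (l.map (fun pd => contribF pd.1 pd.2 ud)).sum := by
  induction l generalizing s with
  | nil => simp
  | cons x xs ih =>
    simp only [List.foldl_cons, List.map_cons, List.sum_cons]
    by_cases h : x.2 ≥ ud
    · rw [if_pos h, ih]; simp only [contribF, if_pos h]; ring
    · rw [if_neg h, ih]; simp only [contribF, if_neg h]; ring

theorem base_fin (users : List (List Int)) (subt : List Int) (acc : Int × Int) :
    (users.zip subt).foldl (fun (acc : Int × Int) us =>
      match us.1 with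
      | [] => acc
      | _ :: rest =>
        match rest with
        | [] => acc
        | uLimit :: _ =>
          if us.2 ≥ uLimit then (acc.1 + 1, acc.2) else (acc.1, acc.2 + us.2)) acc
      = finPS users subt (fun _ => 0) acc := by
  unfold finPS
  apply List.foldl_ext
  intro a us _
  rcases us with ⟨u, s⟩
  rcases u with _ | ⟨ud, _ | ⟨lim, rest⟩⟩ <;> simp

theorem upd_fin (price dc : Int) (users : List (List Int)) (subt : List Int)
    (ps : Int → Int) (acc : Int × Int) :
    finPS users
      ((users.zip subt).map (fun us =>
        match us.1 with
        | [] => us.2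
        | ud :: _ => us.2 + (if dc ≥ ud then discountCalculatorB price dc else 0))) ps acc
      = finPS users subt (fun ud => contribF price dc ud + ps ud) acc := by
  induction users generalizing subt acc with
  | nil => rfl
  | cons u us ih =>
    cases subt with
    | nil => rfl
    | cons s ss =>
      rcases u with _ | ⟨ud, _ | ⟨lim, rest⟩⟩
      · simpa [finPS] using ih ss _
      · simpa [finPS] using ih ss _
      · simp only [finPS, List.zip_cons_cons, List.map_cons, List.foldl_cons, contribF,
          discountCalculatorB, discountCalculator]
        rw [show s + (if dc ≥ ud then PySem.Int.floordiv (price * (100 - dc)) 100 else 0)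
              + ps ud
              = s + ((if dc ≥ ud then PySem.Int.floordiv (price * (100 - dc)) 100 else 0) + ps ud)
            by ring]
        exact ih ss _

theorem psum_cons (p dc : Int) (es ds : List Int) :
    psum (p :: es) (dc :: ds) = fun ud => contribF p dc ud + psum es ds ud := by
  funext ud
  simp [psum]

theorem dfsB_eq (users : List (List Int)) (rates : List Int) (es : List Int)
    (subt : List Int) (best : Int × Int) :
    dfsB users rates es subt best
      = (prodTuples rates es.length).foldl
          (fun b t =>
            let pt := finPS users subt (psum es t) ((0 : Int), (0 : Int))
            if b.1 < pt.1 ∨ (b.1 = pt.1 ∧ b.2 < pt.2) then pt else b) best := by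
  induction es generalizing subt best with
  | nil =>
    simp only [dfsB, List.length_nil, prodTuples, List.foldl_cons, List.foldl_nil]
    rw [base_fin]
    have : psum [] [] = fun (_ : Int) => (0 : Int) := by funext ud; simp [psum]
    rw [this]
  | cons p rest ih =>
    simp only [dfsB, List.length_cons, prodTuples]
    rw [foldl_flatMap]
    apply List.foldl_ext
    intro dc _ b
    rw [ih, List.foldl_map]
    apply List.foldl_ext
    intro t _ b'
    rw [upd_fin, psum_cons]

theorem finPS_cons₂ (ud lim : Int) (rest : List Int) (us : List (List Int))
    (s : Int) (ss : List Int) (ps : Int → Int) (acc : Int × Int) :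
    finPS ((ud :: lim :: rest) :: us) (s :: ss) ps acc
      = finPS us ss ps
          (if s + ps ud ≥ lim then (acc.1 + 1, acc.2) else (acc.1, acc.2 + (s + ps ud))) := rfl

theorem usersA_fin (es t : List Int) (users : List (List Int)) (acc : Int × Int) :
    users.foldl (fun (acc : Int × Int) user =>
      match user with
      | uDiscount :: uLimit :: _ =>
        let total := (es.zip t).foldl
          (fun total pd =>
            if pd.2 ≥ uDiscount then total + discountCalculator pd.1 pd.2 else total) 0
        if total ≥ uLimit then (acc.1 + 1, acc.2) else (acc.1, acc.2 + total)
      | _ => acc) acc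
      = finPS users (users.map (fun _ => (0 : Int))) (psum es t) acc := by
  induction users generalizing acc with
  | nil => rfl
  | cons u us ih =>
    rcases u with _ | ⟨ud, _ | ⟨lim, rest⟩⟩
    · simpa [finPS] using ih _
    · simpa [finPS] using ih _
    · simp only [List.map_cons, List.foldl_cons, finPS_cons₂]
      rw [foldl_shift, ih]
      simp [psum]

-- ===== VERDICT (by name: the statement is the Claim_ definition above) =====
theorem solution_spec : Claim_equal_solution := by
  intro users emoticons _ _
  unfold Spec_solution solution solution_alt
  rw [dfsB_eq]
  have key : ∀ (b : Int × Int) (t : List Int),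
      (fun pt : Int × Int => if b.1 < pt.1 ∨ (b.1 = pt.1 ∧ b.2 < pt.2) then pt else b)
          (users.foldl (fun (acc : Int × Int) user =>
            match user with
            | uDiscount :: uLimit :: _ =>
              let total := (emoticons.zip t).foldl
                (fun total pd =>
                  if pd.2 ≥ uDiscount then total + discountCalculator pd.1 pd.2 else total) 0
              if total ≥ uLimit then (acc.1 + 1, acc.2) else (acc.1, acc.2 + total)
            | _ => acc) ((0 : Int), (0 : Int)))
        = (fun pt : Int × Int => if b.1 < pt.1 ∨ (b.1 = pt.1 ∧ b.2 < pt.2) then pt else b)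
            (finPS users (users.map (fun _ => (0 : Int))) (psum emoticons t)
              ((0 : Int), (0 : Int))) := by
    intro b t
    exact congrArg
      (fun pt : Int × Int => if b.1 < pt.1 ∨ (b.1 = pt.1 ∧ b.2 < pt.2) then pt else b)
      (usersA_fin emoticons t users ((0 : Int), (0 : Int)))
  exact congrArg (fun x : Int × Int => [x.1, x.2]) (List.foldl_ext _ _ _ (fun b t _ => key b t))
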